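-- pv_equiv track=rewrite | github.com/MichaelT-178/ApartmentRegistry | Python/createClass.py | create_constructor
-- ===== SOURCE A (Python) =====
-- def create_constructor(object_name, all_lists):
--
--     construct_str = f"\n\t/**\n\t * Creates a {object_name} object\n"
--
--     for a_list in all_lists:
--         for var in a_list:
--             construct_str += f"\t * @param {var.split()[1]} FILL THIS IN\n"
--
--     construct_str += "\t */\n"
--     construct_str += f"\tpublic {object_name}("
--
--     for a_list in all_lists:
--         construct_str += ''.join([f"{x.split()[2]} {x.split()[1]}, " for x in a_list])
--
--
--     construct_str = construct_str.rstrip()[:-1] + f") {{\n"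
--
--     for a_list in all_lists:
--         for var in a_list:
--             construct_str += f"\t\tthis.{var.split()[1]} = {var.split()[1]};\n"
--
--     construct_str += f"\t}}\n\n"
--
--     return construct_str
-- ===== SOURCE B (Python) =====
-- def create_constructor(object_name, all_lists):
--     # Single pass: one loop over all variables fills three accumulators at once,
--     # instead of A's three separate passes appending to one growing string.
--     doc, params, body = [], [], []
--     for lst in all_lists:
--         for v in lst:
--             toks = v.split()
--             name = toks[1]
--             doc.append(f"\t * @param {name} FILL THIS IN\n")
--             params.append(f"{toks[2]} {name}")
--             body.append(f"\t\tthis.{name} = {name};\n")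
--     sig = (f"\tpublic {object_name}("
--            + "".join(p + ", " for p in params)).rstrip()[:-1]
--     return (f"\n\t/**\n\t * Creates a {object_name} object\n{''.join(doc)}\t */\n"
--             + sig + f") {{\n{''.join(body)}\t}}\n\n")
-- ===== Notes on version B (the rewrite author's own statement) =====
-- stated objective: alternative
-- what changed: A makes three separate passes over the nested lists, each re-splitting every variable and appending to one growing string; B makes a single pass that splits each variable once and fills three accumulators (doc lines, parameters, assignments) simultaneously, then assembles the result from the sections.
import Mathlib
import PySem

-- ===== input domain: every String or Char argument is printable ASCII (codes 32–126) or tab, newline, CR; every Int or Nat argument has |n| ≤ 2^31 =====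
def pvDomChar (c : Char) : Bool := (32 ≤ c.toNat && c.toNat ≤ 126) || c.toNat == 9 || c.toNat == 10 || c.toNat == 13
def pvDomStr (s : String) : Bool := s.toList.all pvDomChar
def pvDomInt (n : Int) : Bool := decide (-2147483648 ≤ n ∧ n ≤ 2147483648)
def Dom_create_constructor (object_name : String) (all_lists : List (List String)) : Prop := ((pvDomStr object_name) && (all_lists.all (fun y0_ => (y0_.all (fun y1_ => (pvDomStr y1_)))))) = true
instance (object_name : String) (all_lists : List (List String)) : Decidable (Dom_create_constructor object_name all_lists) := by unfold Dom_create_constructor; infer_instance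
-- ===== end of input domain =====

-- B fills three accumulators (doc, params, body) in a single pass over the variables, then assembles the sections; A makes three separate appending passes. Return values proved equal.


-- ===== PORT A =====
-- shared helper: var.split()[i]; Pre_ guarantees the index is in range, so getD's default is never used
def pvTok (v : String) (i : Nat) : List Char := (PySem.Chars.split₀ v.toList).getD i []

-- literal port of A: one growing string, three append loops; s[:-1] is List.dropLast
def create_constructor (object_name : String) (all_lists : List (List String)) : String :=
  let name := object_name.toList
  let s0 := "\n\t/**\n\t * Creates a ".toList ++ name ++ " object\n".toList
  let s1 := all_lists.foldl (fun acc a_list =>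
      a_list.foldl (fun acc var =>
        acc ++ ("\t * @param ".toList ++ pvTok var 1 ++ " FILL THIS IN\n".toList)) acc) s0
  let s2 := s1 ++ "\t */\n".toList ++ ("\tpublic ".toList ++ name ++ "(".toList)
  let s3 := all_lists.foldl (fun acc a_list =>
      acc ++ PySem.Chars.join []
        (a_list.map (fun x => pvTok x 2 ++ " ".toList ++ pvTok x 1 ++ ", ".toList))) s2
  let s4 := (PySem.Chars.rstrip s3).dropLast ++ ") {\n".toList
  let s5 := all_lists.foldl (fun acc a_list =>
      a_list.foldl (fun acc var =>
        acc ++ ("\t\tthis.".toList ++ pvTok var 1 ++ " = ".toList ++ pvTok var 1 ++ ";\n".toList)) acc) s4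
  String.ofList (s5 ++ "\t}\n\n".toList)

-- ===== PORT B =====
-- the loop body of Source B: append one f-string piece to each of the three accumulators
def pvStep (acc : List (List Char) × List (List Char) × List (List Char)) (v : String) :
    List (List Char) × List (List Char) × List (List Char) :=
  (acc.1 ++ ["\t * @param ".toList ++ pvTok v 1 ++ " FILL THIS IN\n".toList],
   acc.2.1 ++ [pvTok v 2 ++ " ".toList ++ pvTok v 1],
   acc.2.2 ++ ["\t\tthis.".toList ++ pvTok v 1 ++ " = ".toList ++ pvTok v 1 ++ ";\n".toList])

-- literal port of Source B: one nested loop filling (doc, params, body), then one assembly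
def create_constructor_alt (object_name : String) (all_lists : List (List String)) : String :=
  let nm := object_name.toList
  let acc := all_lists.foldl (fun acc lst => lst.foldl pvStep acc) ([], [], [])
  let sig := (PySem.Chars.rstrip ("\tpublic ".toList ++ nm ++ "(".toList
      ++ PySem.Chars.join [] (acc.2.1.map (fun p => p ++ ", ".toList)))).dropLast
  String.ofList ("\n\t/**\n\t * Creates a ".toList ++ nm ++ " object\n".toList
    ++ PySem.Chars.join [] acc.1 ++ "\t */\n".toList
    ++ sig ++ ") {\n".toList ++ PySem.Chars.join [] acc.2.2 ++ "\t}\n\n".toList)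

-- ===== PRECONDITION & SPEC =====
-- Pre_ excludes exactly the inputs where Python A raises IndexError: some variable string has fewer than 3 whitespace-separated tokens.
def Pre_create_constructor (object_name : String) (all_lists : List (List String)) : Prop :=
  ∀ lst ∈ all_lists, ∀ v ∈ lst, 3 ≤ (PySem.Chars.split₀ v.toList).length
instance (object_name : String) (all_lists : List (List String)) : Decidable (Pre_create_constructor object_name all_lists) := by unfold Pre_create_constructor; infer_instance
def pvWitness_create_constructor : String × List (List String) := ("Apartment", [["private int rent"], ["private String name"]])
def Spec_create_constructor (object_name : String) (all_lists : List (List String)) (out : String) : Prop := out = create_constructor_alt object_name all_lists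
instance (object_name : String) (all_lists : List (List String)) (out : String) : Decidable (Spec_create_constructor object_name all_lists out) := by unfold Spec_create_constructor; infer_instance

-- ===== CLAIM =====
def Claim_equal_create_constructor : Prop := ∀ (object_name : String) (all_lists : List (List String)), Dom_create_constructor object_name all_lists → Pre_create_constructor object_name all_lists → Spec_create_constructor object_name all_lists (create_constructor object_name all_lists)

-- ===== LEMMAS AND PROOFS =====
-- ''.join with empty separator is list flatten
theorem pvJoinNil (l : List (List Char)) : PySem.Chars.join [] l = l.flatten := by
  simp only [PySem.Chars.join, List.intercalate]
  induction l with
  | nil => rfl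
  | cons a t ih =>
    cases t with
    | nil => simp
    | cons b u => simp_all [List.intersperse]

-- Source B's inner loop over one list appends the mapped pieces to the three accumulators
theorem pvStepList (lst : List String) (acc : List (List Char) × List (List Char) × List (List Char)) :
    lst.foldl pvStep acc
      = (acc.1 ++ lst.map (fun v => "\t * @param ".toList ++ pvTok v 1 ++ " FILL THIS IN\n".toList),
         acc.2.1 ++ lst.map (fun v => pvTok v 2 ++ " ".toList ++ pvTok v 1),
         acc.2.2 ++ lst.map (fun v => "\t\tthis.".toList ++ pvTok v 1 ++ " = ".toList ++ pvTok v 1 ++ ";\n".toList)) := by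
  induction lst generalizing acc with
  | nil => simp
  | cons v t ih => simp [ih, pvStep]

-- Source B's outer loop flattens all_lists' pieces
theorem pvStepAll (al : List (List String)) (acc : List (List Char) × List (List Char) × List (List Char)) :
    al.foldl (fun acc lst => lst.foldl pvStep acc) acc
      = (acc.1 ++ (al.flatMap id).map (fun v => "\t * @param ".toList ++ pvTok v 1 ++ " FILL THIS IN\n".toList),
         acc.2.1 ++ (al.flatMap id).map (fun v => pvTok v 2 ++ " ".toList ++ pvTok v 1),
         acc.2.2 ++ (al.flatMap id).map (fun v => "\t\tthis.".toList ++ pvTok v 1 ++ " = ".toList ++ pvTok v 1 ++ ";\n".toList)) := by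
  induction al generalizing acc with
  | nil => simp
  | cons lst t ih =>
    rw [List.foldl_cons, pvStepList, ih]
    simp [List.append_assoc]

-- A's nested append loops flatten the per-variable pieces over the flattened variables
theorem pvLoopA (al : List (List String)) (f : String → List Char) (init : List Char) :
    al.foldl (fun acc (a_list : List String) => a_list.foldl (fun acc var => acc ++ f var) acc) init
      = init ++ ((al.flatMap id).map f).flatten := by
  induction al generalizing init with
  | nil => simp
  | cons lst t ih =>
    rw [List.foldl_cons, PySem.List.foldl_append_eq_flatMap, ih]
    simp [List.flatMap_def, List.append_assoc, List.flatten_append]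

-- A's parameter loop (per-list joins) also flattens over the flattened variables
theorem pvFlat (g : String → List Char) (al : List (List String)) :
    al.flatMap (fun l => (l.map g).flatten) = ((al.flatMap id).map g).flatten := by
  induction al <;> simp_all

-- rstrip of the whole accumulated string only acts on its signature suffix (it contains 'p')
theorem pvRstripPrefix (x y : List Char) (h : ∃ c ∈ y, PySem.Chars.isspace c = false) :
    (PySem.Chars.rstrip (x ++ y)).dropLast = x ++ (PySem.Chars.rstrip y).dropLast := by
  obtain ⟨c, hc, hcs⟩ := h
  have hne : y.reverse.dropWhile PySem.Chars.isspace ≠ [] := by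
    intro he
    rw [List.dropWhile_eq_nil_iff] at he
    exact absurd (he c (by simpa using hc)) (by simp [hcs])
  simp only [PySem.Chars.rstrip, List.reverse_append, List.dropWhile_append,
    List.isEmpty_iff, hne, if_false, List.reverse_reverse]
  rw [List.dropLast_append_of_ne_nil (by simpa using hne)]

-- A's rstrip-then-drop of the full string equals B's, applied to the signature part only
theorem pvMain (nm D P tl : List Char) :
    (PySem.Chars.rstrip ("\n\t/**\n\t * Creates a ".toList ++ (nm ++ (" object\n".toList ++ (D ++ ("\t */\n".toList ++ ("\tpublic ".toList ++ (nm ++ ("(".toList ++ P)))))))) ).dropLast ++ tl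
    = "\n\t/**\n\t * Creates a ".toList ++ (nm ++ (" object\n".toList ++ (D ++ ("\t */\n".toList ++ ((PySem.Chars.rstrip ("\tpublic ".toList ++ (nm ++ ("(".toList ++ P)))).dropLast ++ tl))))) := by
  have h := pvRstripPrefix
    ("\n\t/**\n\t * Creates a ".toList ++ (nm ++ (" object\n".toList ++ (D ++ "\t */\n".toList))))
    ("\tpublic ".toList ++ (nm ++ ("(".toList ++ P)))
    ⟨'p', List.mem_append_left _ (by decide), by decide⟩
  simp only [List.append_assoc] at h
  rw [h]
  simp [List.append_assoc]

-- point-free flatMap as map-then-flatten, for rewriting under a binder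
theorem pvFMdef (f : String → List Char) : List.flatMap f = fun l => (l.map f).flatten := by
  funext l; simp [List.flatMap_def]

-- ===== VERDICT =====
theorem create_constructor_spec : Claim_equal_create_constructor := by
  intro object_name all_lists _ _
  show create_constructor object_name all_lists = create_constructor_alt object_name all_lists
  simp only [create_constructor, create_constructor_alt, pvLoopA, pvStepAll,
    PySem.List.foldl_append_eq_flatMap, pvJoinNil, pvFlat, List.map_map,
    List.nil_append, List.append_assoc]
  rw [pvMain]
  simp [Function.comp_def, List.append_assoc, pvFMdef, List.flatMap_def, List.flatten_flatten, List.map_map]
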